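-- pv_equiv track=rewrite | github.com/rog713/ESP-Host-Bridge-Addon | esp_host_bridge/app/esp_host_bridge/integrations/activity.py | parse_compact_activity
-- ===== SOURCE A (Python) =====
-- from typing import Any, Dict
--
-- def parse_compact_activity(value: Any) -> list[dict[str, str]]:
--     raw = str(value or "").strip()
--     if not raw or raw == "-":
--         return []
--     rows: list[dict[str, str]] = []
--     for item in raw.split(";"):
--         token = str(item or "").strip()
--         if not token:
--             continue
--         parts = token.split("|")
--         rows.append(
--             {
--                 "name": str(parts[0] if len(parts) > 0 else "").strip(),
--                 "message": str(parts[1] if len(parts) > 1 else "").strip(),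
--                 "age": str(parts[2] if len(parts) > 2 else "").strip(),
--                 "source": str(parts[3] if len(parts) > 3 else "").strip(),
--                 "tail": str(parts[4] if len(parts) > 4 else "").strip(),
--             }
--         )
--     return [row for row in rows if any(row.values())][:5]
-- ===== SOURCE B (Python) =====
-- _FIELDS = ("name", "message", "age", "source", "tail")
--
-- def parse_compact_activity(value):
--     s = str(value or "").strip()
--     if not s or s == "-":
--         return []
--     rows = []
--     parts = []   # completed '|'-fields of the current record (raw text)
--     buf = []     # characters of the field currently being read
--
--     def finish(parts, buf):
--         vals = [p.strip() for p in parts] + ["".join(buf).strip()]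
--         row = {f: (vals[i] if i < len(vals) else "")
--                for i, f in enumerate(_FIELDS)}
--         if any(row.values()) and len(rows) < 5:
--             rows.append(row)
--
--     for ch in s:
--         if ch == ';':
--             finish(parts, buf)
--             parts = []
--             buf = []
--         elif ch == '|':
--             parts.append("".join(buf))
--             buf = []
--         else:
--             buf.append(ch)
--     finish(parts, buf)
--     return rows
-- ===== Notes on version B (the rewrite author's own statement) =====
-- stated objective: alternative
-- what changed: B replaces A's split(';')/split('|')/strip/filter/slice pipeline by a single character-level scanner: one pass over the string with a field buffer and a record accumulator, closing a field at '|' and a record at ';', keeping a record only if some stripped field is non-empty and at most five records.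
import Mathlib
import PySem

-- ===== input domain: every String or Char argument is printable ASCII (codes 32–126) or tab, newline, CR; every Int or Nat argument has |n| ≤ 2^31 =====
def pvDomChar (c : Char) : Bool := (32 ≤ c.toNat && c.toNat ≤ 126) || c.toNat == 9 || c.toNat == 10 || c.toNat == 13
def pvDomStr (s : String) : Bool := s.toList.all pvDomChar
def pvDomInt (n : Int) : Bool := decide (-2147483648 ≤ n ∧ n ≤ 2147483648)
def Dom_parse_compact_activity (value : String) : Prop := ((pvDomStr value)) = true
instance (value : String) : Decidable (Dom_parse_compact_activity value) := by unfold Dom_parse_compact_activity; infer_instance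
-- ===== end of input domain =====

-- B replaces A's split-split-filter-slice pipeline with a single character-level scanner:
-- one pass over the string with field/record accumulators (no split calls), appending a kept
-- row at each ';' boundary while fewer than five have been kept; alternative decomposition,
-- same asymptotic cost.

-- ===== PORT A =====
-- s.split(sep) with a nonempty literal sep: split? is some there; getD just removes the option.
def pvSplit (s sep : String) : List String := (PySem.Str.split? s sep).getD []

-- `str(value or "")` on a String argument is the string itself (empty stays empty), so raw = value.strip().
def parse_compact_activity (value : String) : List (List (String × String)) :=
  let raw := PySem.Str.strip value
  if raw = "" ∨ raw = "-" then []
  else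
    let rows := (pvSplit raw ";").foldl (fun acc item =>
      let token := PySem.Str.strip item
      if token = "" then acc
      else
        let parts := pvSplit token "|"
        acc ++ [[("name",    PySem.Str.strip (parts.getD 0 "")),
                 ("message", PySem.Str.strip (parts.getD 1 "")),
                 ("age",     PySem.Str.strip (parts.getD 2 "")),
                 ("source",  PySem.Str.strip (parts.getD 3 "")),
                 ("tail",    PySem.Str.strip (parts.getD 4 ""))]]) []
    (rows.filter (fun row => row.any (fun kv => kv.2 != ""))).take 5

-- ===== PORT B =====
-- B's python: a nested `finish(parts, buf)` closing the current record, then one `for ch in s` loop.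
def pvFields : List String := ["name", "message", "age", "source", "tail"]

-- `finish`: vals = stripped completed fields + stripped current buffer; row zips the field
-- names over vals (missing fields ""); kept only if non-empty and fewer than 5 rows so far.
def pvFinish (parts : List (List Char)) (buf : List Char)
    (rows : List (List (String × String))) : List (List (String × String)) :=
  let vals := parts.map (fun p => String.ofList (PySem.Chars.strip p)) ++
              [String.ofList (PySem.Chars.strip buf)]
  let row := (PySem.List.enumerate pvFields 0).map
    (fun p => (p.2, if p.1.toNat < vals.length then vals.getD p.1.toNat "" else ""))
  if row.any (fun kv => kv.2 != "") = true ∧ rows.length < 5 then rows ++ [row] else rows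

-- the `for ch in s` loop: ';' closes a record, '|' closes a field, anything else extends buf.
def pvScan : List Char → List (List Char) → List Char → List (List (String × String)) →
    List (List (String × String))
  | [], parts, buf, rows => pvFinish parts buf rows
  | c :: rest, parts, buf, rows =>
    if c = ';' then pvScan rest [] [] (pvFinish parts buf rows)
    else if c = '|' then pvScan rest (parts ++ [buf]) [] rows
    else pvScan rest parts (buf ++ [c]) rows

def parse_compact_activity_alt (value : String) : List (List (String × String)) :=
  let s := PySem.Str.strip value
  if s = "" ∨ s = "-" then [] else pvScan s.toList [] [] []

-- ===== PRECONDITION & SPEC =====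
def Spec_parse_compact_activity (value : String) (out : List (List (String × String))) : Prop := out = parse_compact_activity_alt value
instance (value : String) (out : List (List (String × String))) : Decidable (Spec_parse_compact_activity value out) := by unfold Spec_parse_compact_activity; infer_instance

-- ===== CLAIM (what is proved, stated in full; the proofs are below) =====
def Claim_equal_parse_compact_activity : Prop := ∀ (value : String), Dom_parse_compact_activity value → Spec_parse_compact_activity value (parse_compact_activity value)

-- ===== LEMMAS AND PROOFS =====

def pvCsplit (sep : Char) : List Char → List (List Char)
  | [] => [[]]
  | c :: rest =>
    if c = sep then [] :: pvCsplit sep rest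
    else
      match pvCsplit sep rest with
      | t :: ts => (c :: t) :: ts
      | [] => [[c]]
theorem pvCsplit_ne_nil (sep : Char) (l : List Char) : pvCsplit sep l ≠ [] := by
  cases l with
  | nil => simp [pvCsplit]
  | cons c rest =>
    simp only [pvCsplit]
    split_ifs
    · simp
    · cases h : pvCsplit sep rest <;> simp
theorem pvCsplit_cons_ne (sep c : Char) (rest : List Char) (h : c ≠ sep)
    {t : List Char} {ts : List (List Char)} (hr : pvCsplit sep rest = t :: ts) :
    pvCsplit sep (c :: rest) = (c :: t) :: ts := by
  simp [pvCsplit, h, hr]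
theorem pvCsplit_cons_sep (sep : Char) (rest : List Char) :
    pvCsplit sep (sep :: rest) = [] :: pvCsplit sep rest := by
  simp [pvCsplit]

def pvMergeFirst (pre : List Char) : List (List Char) → List (List Char)
  | [] => [pre]
  | t :: ts => (pre ++ t) :: ts

theorem pvGo_zero (sep : Char) (l cur : List Char) (acc : List (List Char)) :
    PySem.Chars.splitOn.go [sep] 0 l cur acc = ((cur.reverse ++ l) :: acc).reverse := by
  rw [PySem.Chars.splitOn.go]

theorem pvGo_succ_nil (sep : Char) (fuel : Nat) (cur : List Char) (acc : List (List Char)) :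
    PySem.Chars.splitOn.go [sep] (fuel + 1) [] cur acc = (cur.reverse :: acc).reverse := by
  rw [PySem.Chars.splitOn.go]
  omega

theorem pvGo_succ_cons (sep c : Char) (fuel : Nat) (rest cur : List Char) (acc : List (List Char)) :
    PySem.Chars.splitOn.go [sep] (fuel + 1) (c :: rest) cur acc =
      if [sep].isPrefixOf (c :: rest) then
        PySem.Chars.splitOn.go [sep] fuel (List.drop [sep].length (c :: rest)) [] (cur.reverse :: acc)
      else PySem.Chars.splitOn.go [sep] fuel rest (c :: cur) acc := by
  rw [PySem.Chars.splitOn.go]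

theorem pvGo_eq (sep : Char) : ∀ (fuel : Nat) (l cur : List Char) (acc : List (List Char)),
    l.length ≤ fuel →
    PySem.Chars.splitOn.go [sep] fuel l cur acc =
      acc.reverse ++ pvMergeFirst cur.reverse (pvCsplit sep l) := by
  intro fuel
  induction fuel with
  | zero =>
    intro l cur acc h
    have hl : l = [] := by cases l with | nil => rfl | cons a b => simp at h
    subst hl
    rw [pvGo_zero]
    simp [pvCsplit, pvMergeFirst]
  | succ fuel ih =>
    intro l cur acc h
    cases l with
    | nil =>
      rw [pvGo_succ_nil]
      simp [pvCsplit, pvMergeFirst]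
    | cons c rest =>
      rw [pvGo_succ_cons]
      by_cases hc : c = sep
      · subst hc
        have hpre : [c].isPrefixOf (c :: rest) = true := by simp [List.isPrefixOf]
        rw [if_pos hpre]
        simp only [List.length_cons] at h
        rw [ih _ _ _ (by simpa using h)]
        obtain ⟨t, ts, hr⟩ := List.exists_cons_of_ne_nil (pvCsplit_ne_nil c rest)
        simp [pvCsplit, hr, pvMergeFirst]
      · have hpre : [sep].isPrefixOf (c :: rest) = false := by
          simp [List.isPrefixOf]
          exact fun e => (hc e.symm).elim
        rw [if_neg (by simp [hpre])]
        simp only [List.length_cons] at h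
        rw [ih _ _ _ (by omega)]
        obtain ⟨t, ts, hr⟩ := List.exists_cons_of_ne_nil (pvCsplit_ne_nil sep rest)
        rw [pvCsplit_cons_ne sep c rest hc hr]
        simp [pvMergeFirst, hr]

theorem pvSplitOn_eq (sep : Char) (l : List Char) :
    PySem.Chars.splitOn l [sep] = pvCsplit sep l := by
  unfold PySem.Chars.splitOn
  rw [pvGo_eq sep (l.length + 1) l [] [] (by omega)]
  obtain ⟨t, ts, hr⟩ := List.exists_cons_of_ne_nil (pvCsplit_ne_nil sep l)
  simp [hr, pvMergeFirst]

theorem pvDW_comm (p : Char → Bool) (l : List Char) :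
    List.dropWhile p (List.dropWhile p l.reverse).reverse =
      (List.dropWhile p (List.dropWhile p l).reverse).reverse := by
  have hdecomp : List.takeWhile p l ++ List.dropWhile p l = l := List.takeWhile_append_dropWhile
  set t := List.takeWhile p l with ht
  set d := List.dropWhile p l with hd
  have htall : List.dropWhile p t.reverse = [] := by
    rw [List.dropWhile_eq_nil_iff]
    intro x hx
    exact List.mem_takeWhile_imp (by simpa using hx)
  have hrev : l.reverse = d.reverse ++ t.reverse := by
    rw [← hdecomp]; simp
  rw [hrev, List.dropWhile_append]
  by_cases hemp : (List.dropWhile p d.reverse).isEmpty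
  · have he : List.dropWhile p d.reverse = [] := by simpa [List.isEmpty_iff] using hemp
    simp [he, htall]
  · rw [if_neg (by simp [hemp])]
    have hX : (List.dropWhile p d.reverse).reverse.dropWhile p = (List.dropWhile p d.reverse).reverse := by
      -- the reversed drop is a nonempty prefix of d, whose head fails p
      have hsuf : (List.dropWhile p d.reverse) <:+ d.reverse := List.dropWhile_suffix p
      have hpre : (List.dropWhile p d.reverse).reverse <+: d := by
        rw [← List.reverse_suffix]
        simpa using hsuf
      obtain ⟨z, hz⟩ := hpre
      cases hXc : (List.dropWhile p d.reverse).reverse with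
      | nil => simp
      | cons a as =>
        have hdne : d ≠ [] := by
          intro e
          rw [e] at hXc; simp at hXc
        obtain ⟨b, bs, hbd⟩ := List.exists_cons_of_ne_nil hdne
        have hdl : List.dropWhile p l = b :: bs := by rw [← hd, hbd]
        have hpb : p b = false := by
          have h' := List.head_dropWhile_not p (l := l) (by rw [hdl]; simp)
          simpa [hdl] using h'
        have hab : a = b := by
          rw [hXc] at hz
          rw [hbd] at hz
          exact (List.cons.injEq _ _ _ _ ▸ hz).1
        simp [hab, hpb]
    rw [List.reverse_append]
    simp only [List.reverse_reverse]
    rw [List.dropWhile_append]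
    have ht0 : List.dropWhile p t = [] := by
      rw [List.dropWhile_eq_nil_iff]
      intro x hx
      exact List.mem_takeWhile_imp hx
    simp [ht0, hX]

theorem pvStrip_lstrip (x : List Char) :
    PySem.Chars.strip (PySem.Chars.lstrip x) = PySem.Chars.strip x := by
  simp [PySem.Chars.strip, PySem.Chars.lstrip, List.dropWhile_idempotent]

theorem pvStrip_rstrip (x : List Char) :
    PySem.Chars.strip (PySem.Chars.rstrip x) = PySem.Chars.strip x := by
  have h1 : PySem.Chars.lstrip (PySem.Chars.rstrip x) = PySem.Chars.strip x := by
    simpa [PySem.Chars.strip, PySem.Chars.lstrip, PySem.Chars.rstrip] using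
      pvDW_comm PySem.Chars.isspace x
  have h2 : PySem.Chars.rstrip (PySem.Chars.strip x) = PySem.Chars.strip x := by
    simp [PySem.Chars.strip, PySem.Chars.rstrip, PySem.Chars.lstrip, List.dropWhile_idempotent]
  calc PySem.Chars.strip (PySem.Chars.rstrip x)
      = PySem.Chars.rstrip (PySem.Chars.lstrip (PySem.Chars.rstrip x)) := rfl
    _ = PySem.Chars.rstrip (PySem.Chars.strip x) := by rw [h1]
    _ = PySem.Chars.strip x := h2

-- modifyLast helpers
theorem pvModifyLast_cons_of_ne {α : Type} (f : α → α) (a : α) (l : List α) (h : l ≠ []) :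
    List.modifyLast f (a :: l) = a :: List.modifyLast f l := by
  obtain ⟨N, b, hnb⟩ := (List.eq_nil_or_concat l).resolve_left h
  subst hnb
  simp only [List.concat_eq_append]
  rw [← List.cons_append, List.modifyLast_concat, List.modifyLast_concat, List.cons_append]

theorem pvModifyLast_singleton {α : Type} (f : α → α) (a : α) :
    List.modifyLast f [a] = [f a] := by
  simpa using List.modifyLast_concat f a []

theorem pvCsplit_dropWhile (sep : Char) (hsep : PySem.Chars.isspace sep = false)
    (u : List Char) :
    pvCsplit sep (List.dropWhile PySem.Chars.isspace u) =
      (pvCsplit sep u).modifyHead (List.dropWhile PySem.Chars.isspace) := by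
  induction u with
  | nil => simp [pvCsplit]
  | cons c u ih =>
    by_cases hws : PySem.Chars.isspace c = true
    · have hcs : c ≠ sep := by
        intro e; rw [e, hsep] at hws; cases hws
      obtain ⟨t, ts, hr⟩ := List.exists_cons_of_ne_nil (pvCsplit_ne_nil sep u)
      rw [List.dropWhile_cons_of_pos hws, ih, pvCsplit_cons_ne sep c u hcs hr, hr]
      simp [List.dropWhile_cons_of_pos hws]
    · have hws' : PySem.Chars.isspace c = false := by simpa using hws
      rw [List.dropWhile_cons_of_neg (by simp [hws'])]
      by_cases hcs : c = sep
      · subst hcs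
        rw [pvCsplit_cons_sep]
        simp
      · obtain ⟨t, ts, hr⟩ := List.exists_cons_of_ne_nil (pvCsplit_ne_nil sep u)
        rw [pvCsplit_cons_ne sep c u hcs hr]
        simp [List.dropWhile_cons_of_neg (by simp [hws'] : ¬ PySem.Chars.isspace c = true)]

theorem pvCsplit_concat (sep c : Char) (xs : List Char) :
    pvCsplit sep (xs ++ [c]) =
      if c = sep then pvCsplit sep xs ++ [[]]
      else (pvCsplit sep xs).modifyLast (· ++ [c]) := by
  induction xs with
  | nil =>
    by_cases hc : c = sep
    · subst hc; simp [pvCsplit]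
    · rw [if_neg hc]
      have h1 : pvCsplit sep [c] = [[c]] := by simp [pvCsplit, hc]
      simp [h1, pvCsplit, pvModifyLast_singleton]
  | cons x xs ih =>
    rw [List.cons_append]
    by_cases hx : x = sep
    · rw [hx, pvCsplit_cons_sep, pvCsplit_cons_sep, ih]
      by_cases hc : c = sep
      · simp [hc]
      · rw [if_neg hc, if_neg hc,
          pvModifyLast_cons_of_ne _ _ _ (pvCsplit_ne_nil sep xs)]
    · obtain ⟨t, ts, hr⟩ := List.exists_cons_of_ne_nil (pvCsplit_ne_nil sep xs)
      obtain ⟨t', ts', hr'⟩ := List.exists_cons_of_ne_nil (pvCsplit_ne_nil sep (xs ++ [c]))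
      have hr0 := hr'
      rw [ih] at hr'
      by_cases hc : c = sep
      · rw [if_pos hc]
        rw [if_pos hc, hr] at hr'
        rw [pvCsplit_cons_ne sep x _ hx hr0, pvCsplit_cons_ne sep x xs hx hr]
        simp at hr'
        simp [← hr'.1, ← hr'.2]
      · rw [if_neg hc]
        rw [if_neg hc, hr] at hr'
        rw [pvCsplit_cons_ne sep x _ hx hr0, pvCsplit_cons_ne sep x xs hx hr]
        cases ts with
        | nil =>
          rw [pvModifyLast_singleton] at hr'
          rw [pvModifyLast_singleton]
          simp at hr'
          simp [← hr'.1, ← hr'.2]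
        | cons t2 ts2 =>
          rw [pvModifyLast_cons_of_ne _ _ _ (by simp)] at hr'
          rw [pvModifyLast_cons_of_ne _ _ _ (by simp)]
          simp at hr'
          simp [← hr'.1, ← hr'.2]


theorem pvCsplit_reverse (sep : Char) (l : List Char) :
    pvCsplit sep l.reverse = ((pvCsplit sep l).map List.reverse).reverse := by
  induction l with
  | nil => simp [pvCsplit]
  | cons c l ih =>
    rw [List.reverse_cons, pvCsplit_concat]
    by_cases hc : c = sep
    · rw [if_pos hc, ih, hc, pvCsplit_cons_sep]
      simp
    · rw [if_neg hc, ih]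
      obtain ⟨t, ts, hr⟩ := List.exists_cons_of_ne_nil (pvCsplit_ne_nil sep l)
      rw [pvCsplit_cons_ne sep c l hc hr, hr]
      simp only [List.map_cons, List.reverse_cons]
      rw [List.modifyLast_concat]

theorem pvCsplit_rstrip (sep : Char) (hsep : PySem.Chars.isspace sep = false)
    (u : List Char) :
    pvCsplit sep (PySem.Chars.rstrip u) = (pvCsplit sep u).modifyLast PySem.Chars.rstrip := by
  have h1 : PySem.Chars.rstrip u = (List.dropWhile PySem.Chars.isspace u.reverse).reverse := rfl
  rw [h1, pvCsplit_reverse, pvCsplit_dropWhile sep hsep, pvCsplit_reverse]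
  obtain ⟨N, a, hna⟩ := (List.eq_nil_or_concat (pvCsplit sep u)).resolve_left (pvCsplit_ne_nil sep u)
  rw [hna]
  simp only [List.concat_eq_append, List.map_append, List.map_cons, List.map_nil,
    List.reverse_append, List.reverse_cons, List.reverse_nil, List.nil_append, List.cons_append,
    List.modifyHead]
  rw [List.modifyLast_concat]
  simp [List.map_reverse, PySem.Chars.rstrip]

theorem pvParts_strip (sep : Char) (hsep : PySem.Chars.isspace sep = false) (t : List Char) :
    (pvCsplit sep (PySem.Chars.strip t)).map PySem.Chars.strip =
      (pvCsplit sep t).map PySem.Chars.strip := by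
  have h1 : PySem.Chars.strip t = PySem.Chars.rstrip (PySem.Chars.lstrip t) := rfl
  have h2 : PySem.Chars.lstrip t = List.dropWhile PySem.Chars.isspace t := rfl
  rw [h1, pvCsplit_rstrip sep hsep, h2, pvCsplit_dropWhile sep hsep]
  -- absorb the two end modifications under the per-part strip
  obtain ⟨t0, ts0, hr⟩ := List.exists_cons_of_ne_nil (pvCsplit_ne_nil sep t)
  rw [hr]
  simp only [List.modifyHead]
  have hs0 : PySem.Chars.strip (List.dropWhile PySem.Chars.isspace t0) = PySem.Chars.strip t0 := by
    have := pvStrip_lstrip t0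
    simpa [PySem.Chars.lstrip] using this
  cases ts0 with
  | nil =>
    rw [pvModifyLast_singleton]
    simp [pvStrip_rstrip, hs0]
  | cons t1 ts1 =>
    rw [pvModifyLast_cons_of_ne _ _ _ (by simp)]
    simp only [List.map_cons]
    rw [hs0]
    -- remaining: map strip over modifyLast rstrip of t1::ts1
    obtain ⟨N, a, hna⟩ := List.eq_nil_or_concat (t1 :: ts1) |>.resolve_left (by simp)
    rw [hna]
    simp only [List.concat_eq_append]
    rw [List.modifyLast_concat]
    simp only [List.map_append, List.map_cons, List.map_nil, pvStrip_rstrip]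
    have hm := congrArg (List.map PySem.Chars.strip) hna
    simp only [List.concat_eq_append, List.map_append, List.map_cons, List.map_nil] at hm
    simpa using hm.symm


-- ---- rows ----
def pvRowOf (ps : List (List Char)) : List (String × String) :=
  [("name",    String.ofList (PySem.Chars.strip (ps.getD 0 []))),
   ("message", String.ofList (PySem.Chars.strip (ps.getD 1 []))),
   ("age",     String.ofList (PySem.Chars.strip (ps.getD 2 []))),
   ("source",  String.ofList (PySem.Chars.strip (ps.getD 3 []))),
   ("tail",    String.ofList (PySem.Chars.strip (ps.getD 4 [])))]

theorem pvStrip_getD (ps : List (List Char)) (i : Nat) :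
    PySem.Chars.strip (ps.getD i []) = (ps.map PySem.Chars.strip).getD i [] := by
  have h := List.getD_map ps ([] : List Char) (n := i) PySem.Chars.strip
  have hnil : PySem.Chars.strip ([] : List Char) = [] := rfl
  rw [hnil] at h
  exact h.symm

theorem pvRowOf_congr {ps qs : List (List Char)}
    (h : ps.map PySem.Chars.strip = qs.map PySem.Chars.strip) : pvRowOf ps = pvRowOf qs := by
  unfold pvRowOf
  rw [pvStrip_getD ps 0, pvStrip_getD ps 1, pvStrip_getD ps 2, pvStrip_getD ps 3,
    pvStrip_getD ps 4, h,
    ← pvStrip_getD qs 0, ← pvStrip_getD qs 1, ← pvStrip_getD qs 2, ← pvStrip_getD qs 3,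
    ← pvStrip_getD qs 4]

def pvAnyP (r : List (String × String)) : Bool := r.any (fun kv => kv.2 != "")

def pvTokRow (t : List Char) : List (String × String) := pvRowOf (pvCsplit '|' t)

theorem pvTokRow_strip (t : List Char) : pvTokRow (PySem.Chars.strip t) = pvTokRow t := by
  exact pvRowOf_congr (pvParts_strip '|' (by decide) t)

theorem pvTokRow_empty (t : List Char) (h : PySem.Chars.strip t = []) :
    pvAnyP (pvTokRow t) = false := by
  rw [← pvTokRow_strip t, h]
  decide

-- A's row built from a (nonempty) token string.
def pvRowA (token : String) : List (String × String) :=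
  let parts := pvSplit token "|"
  [("name",    PySem.Str.strip (parts.getD 0 "")),
   ("message", PySem.Str.strip (parts.getD 1 "")),
   ("age",     PySem.Str.strip (parts.getD 2 "")),
   ("source",  PySem.Str.strip (parts.getD 3 "")),
   ("tail",    PySem.Str.strip (parts.getD 4 ""))]

theorem pvSplit_eq (s : String) (sep : String) (c : Char) (hsep : sep.toList = [c]) :
    pvSplit s sep = (pvCsplit c s.toList).map String.ofList := by
  unfold pvSplit
  rw [PySem.Str.split?]
  simp [PySem.Chars.split?, hsep, pvSplitOn_eq]

theorem pvStrStrip_ofList (m : List Char) :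
    PySem.Str.strip (String.ofList m) = String.ofList (PySem.Chars.strip m) := by
  rw [PySem.Str.strip]
  simp

theorem pvGetD_ofList (P : List (List Char)) (i : Nat) :
    (P.map String.ofList).getD i "" = String.ofList (P.getD i []) := by
  have h := List.getD_map P ([] : List Char) (n := i) String.ofList
  have he : String.ofList ([] : List Char) = "" := by decide
  rw [he] at h
  exact h

theorem pvRowA_ofList (l : List Char) :
    pvRowA (PySem.Str.strip (String.ofList l)) = pvTokRow l := by
  rw [pvStrStrip_ofList]
  unfold pvRowA pvTokRow pvRowOf
  rw [pvSplit_eq _ "|" '|' (by decide), String.toList_ofList]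
  simp only [pvGetD_ofList, pvStrStrip_ofList]
  have hp := pvParts_strip '|' (by decide) l
  simp only [pvStrip_getD, hp]

-- A's foldl of appends is filter-then-map over the tokens.
theorem pvRowsA_eq (items : List String) (acc : List (List (String × String))) :
    items.foldl (fun acc item =>
      let token := PySem.Str.strip item
      if token = "" then acc
      else
        let parts := pvSplit token "|"
        acc ++ [[("name",    PySem.Str.strip (parts.getD 0 "")),
                 ("message", PySem.Str.strip (parts.getD 1 "")),
                 ("age",     PySem.Str.strip (parts.getD 2 "")),
                 ("source",  PySem.Str.strip (parts.getD 3 "")),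
                 ("tail",    PySem.Str.strip (parts.getD 4 ""))]]) acc
      = acc ++ (items.filter (fun i => PySem.Str.strip i != "")).map
          (fun i => pvRowA (PySem.Str.strip i)) := by
  induction items generalizing acc with
  | nil => simp
  | cons x xs ih =>
    rw [List.foldl_cons, ih]
    by_cases hx : PySem.Str.strip x = "" <;>
      simp [hx, pvRowA]

-- dropping A's empty-token filter is harmless: empty tokens give all-empty rows.
theorem pvFilter_absorb (L : List (List Char)) :
    ((L.filter (fun l => PySem.Chars.strip l ≠ [])).map pvTokRow).filter pvAnyP =
      (L.map pvTokRow).filter pvAnyP := by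
  induction L with
  | nil => rfl
  | cons x L ih =>
    by_cases hx : PySem.Chars.strip x = []
    · rw [List.map_cons,
        List.filter_cons_of_neg (by rw [hx]; simp),
        List.filter_cons_of_neg (by rw [pvTokRow_empty x hx]; simp)]
      exact ih
    · rw [List.filter_cons_of_pos (by simpa using hx), List.map_cons, List.map_cons]
      by_cases hr : pvAnyP (pvTokRow x) = true
      · rw [List.filter_cons_of_pos hr, List.filter_cons_of_pos hr, ih]
      · rw [List.filter_cons_of_neg (by simpa using hr),
          List.filter_cons_of_neg (by simpa using hr)]
        exact ih

-- A's kept rows, char-level.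
theorem pvA_kept (raw : String) :
    (((pvSplit raw ";").filter (fun i => PySem.Str.strip i != "")).map
        (fun i => pvRowA (PySem.Str.strip i))).filter pvAnyP =
      ((pvCsplit ';' raw.toList).map pvTokRow).filter pvAnyP := by
  rw [pvSplit_eq raw ";" ';' (by decide),
    List.filter_map (f := String.ofList) (p := fun i => PySem.Str.strip i != ""),
    List.map_map]
  have hpred : ((fun i => PySem.Str.strip i != "") ∘ String.ofList) =
      (fun l => decide (PySem.Chars.strip l ≠ [])) := by
    funext m
    simp only [Function.comp, pvStrStrip_ofList]
    have hiff : (String.ofList (PySem.Chars.strip m) = "") ↔ PySem.Chars.strip m = [] := by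
      constructor
      · intro h
        have := congrArg String.toList h
        simpa using this
      · intro h
        rw [h]
    by_cases hm : PySem.Chars.strip m = []
    · simp [hm]
    · have : String.ofList (PySem.Chars.strip m) ≠ "" := fun e => hm (hiff.mp e)
      simp [hm, this]
  have hmap : ((fun i => pvRowA (PySem.Str.strip i)) ∘ String.ofList) = pvTokRow := by
    funext m
    simp only [Function.comp]
    exact pvRowA_ofList m
  rw [hpred, hmap]
  exact pvFilter_absorb _

-- ---- B's scanner ----
def pvStep (rows : List (List (String × String))) (ps : List (List Char)) :
    List (List (String × String)) :=
  if pvAnyP (pvRowOf ps) = true ∧ rows.length < 5 then rows ++ [pvRowOf ps] else rows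

def pvProc (toks : List (List Char)) (rows : List (List (String × String))) :
    List (List (String × String)) :=
  toks.foldl (fun r t => pvStep r (pvCsplit '|' t)) rows

theorem pvGetD_vals (ps : List (List Char)) (i : Nat) :
    (if i < (ps.map (fun p => String.ofList (PySem.Chars.strip p))).length
     then (ps.map (fun p => String.ofList (PySem.Chars.strip p))).getD i "" else "")
      = String.ofList (PySem.Chars.strip (ps.getD i [])) := by
  induction ps generalizing i with
  | nil =>
    simp [List.getD]
    decide
  | cons x xs ih =>
    cases i with
    | zero => simp [List.getD]
    | succ j =>
      have := ih j
      simpa [List.getD, Nat.succ_lt_succ_iff] using this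

theorem pvFinish_eq (parts : List (List Char)) (buf : List Char)
    (rows : List (List (String × String))) :
    pvFinish parts buf rows = pvStep rows (parts ++ [buf]) := by
  simp only [pvFinish, pvStep]
  have hps : parts.map (fun p => String.ofList (PySem.Chars.strip p)) ++
      [String.ofList (PySem.Chars.strip buf)]
      = (parts ++ [buf]).map (fun p => String.ofList (PySem.Chars.strip p)) := by simp
  rw [hps]
  have h := pvGetD_vals (parts ++ [buf])
  have hrow : (PySem.List.enumerate pvFields 0).map
      (fun p => (p.2,
        if p.1.toNat < ((parts ++ [buf]).map (fun q => String.ofList (PySem.Chars.strip q))).length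
        then ((parts ++ [buf]).map (fun q => String.ofList (PySem.Chars.strip q))).getD p.1.toNat ""
        else "")) = pvRowOf (parts ++ [buf]) := by
    have h' := h
    simp [List.getD] at h'
    simp [pvFields, PySem.List.enumerate_cons, PySem.List.enumerate_nil, pvRowOf, List.getD]
    refine ⟨?_, h' 1, h' 2, h' 3, h' 4⟩
    cases parts <;> simp
  rw [hrow]
  rfl

theorem pvScan_eq : ∀ (cs : List Char) (parts : List (List Char)) (buf : List Char)
    (rows : List (List (String × String))),
    pvScan cs parts buf rows =
      pvProc (pvCsplit ';' cs).tail
        (pvStep rows (parts ++ pvMergeFirst buf (pvCsplit '|' ((pvCsplit ';' cs).headD [])))) := by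
  intro cs
  induction cs with
  | nil =>
    intro parts buf rows
    have h0 : pvCsplit ';' ([] : List Char) = [[]] := rfl
    have h1 : pvCsplit '|' ([] : List Char) = [[]] := rfl
    rw [h0]
    simp only [List.headD, List.tail, h1, pvMergeFirst, pvProc, List.foldl_nil]
    simp [pvScan, pvFinish_eq]
  | cons c rest ih =>
    intro parts buf rows
    by_cases hc : c = ';'
    · obtain ⟨t, ts, hr⟩ := List.exists_cons_of_ne_nil (pvCsplit_ne_nil ';' rest)
      obtain ⟨p0, ps0, hp⟩ := List.exists_cons_of_ne_nil (pvCsplit_ne_nil '|' t)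
      rw [hc, pvCsplit_cons_sep, show pvScan (';' :: rest) parts buf rows
          = pvScan rest [] [] (pvFinish parts buf rows) from by simp [pvScan]]
      rw [ih, hr, pvFinish_eq]
      have hbnil : pvCsplit '|' ([] : List Char) = [[]] := rfl
      simp only [List.headD, List.tail, hbnil, hp, pvMergeFirst, List.nil_append,
        List.append_nil]
      simp [pvProc, hp]
    · by_cases hb : c = '|'
      · obtain ⟨t, ts, hr⟩ := List.exists_cons_of_ne_nil (pvCsplit_ne_nil ';' rest)
        obtain ⟨p0, ps0, hp⟩ := List.exists_cons_of_ne_nil (pvCsplit_ne_nil '|' t)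
        rw [show pvScan (c :: rest) parts buf rows
            = pvScan rest (parts ++ [buf]) [] rows from by simp [pvScan, hb]]
        rw [ih, hr, pvCsplit_cons_ne ';' c rest hc hr]
        simp only [List.headD, List.tail]
        rw [hb, pvCsplit_cons_sep, hp]
        simp [pvMergeFirst]
      · obtain ⟨t, ts, hr⟩ := List.exists_cons_of_ne_nil (pvCsplit_ne_nil ';' rest)
        obtain ⟨p0, ps0, hp⟩ := List.exists_cons_of_ne_nil (pvCsplit_ne_nil '|' t)
        rw [show pvScan (c :: rest) parts buf rows
            = pvScan rest parts (buf ++ [c]) rows from by simp [pvScan, hc, hb]]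
        rw [ih, hr, pvCsplit_cons_ne ';' c rest hc hr]
        simp only [List.headD, List.tail]
        rw [pvCsplit_cons_ne '|' c t hb hp, hp]
        simp [pvMergeFirst]

theorem pvScan_top (cs : List Char) : pvScan cs [] [] [] = pvProc (pvCsplit ';' cs) [] := by
  rw [pvScan_eq]
  obtain ⟨t, ts, hr⟩ := List.exists_cons_of_ne_nil (pvCsplit_ne_nil ';' cs)
  obtain ⟨p0, ps0, hp⟩ := List.exists_cons_of_ne_nil (pvCsplit_ne_nil '|' t)
  rw [hr]
  simp only [List.headD, List.tail, hp, pvMergeFirst, List.nil_append]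
  simp [pvProc, hp]

theorem pvProc_eq (toks : List (List Char)) : ∀ (rows : List (List (String × String))),
    rows.length ≤ 5 →
    pvProc toks rows = rows ++ ((toks.map pvTokRow).filter pvAnyP).take (5 - rows.length) := by
  induction toks with
  | nil => simp [pvProc]
  | cons t ts ih =>
    intro rows hlen
    have hfold : pvProc (t :: ts) rows = pvProc ts (pvStep rows (pvCsplit '|' t)) := by
      simp [pvProc]
    rw [hfold]
    by_cases ha : pvAnyP (pvTokRow t) = true
    · by_cases hlt : rows.length < 5
      · have ha' : pvAnyP (pvRowOf (pvCsplit '|' t)) = true := by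
          simpa [pvTokRow] using ha
        have hstep : pvStep rows (pvCsplit '|' t) = rows ++ [pvTokRow t] := by
          simp only [pvStep, pvTokRow]
          rw [if_pos ⟨ha', hlt⟩]
        rw [hstep, ih _ (by simp; omega)]
        rw [List.map_cons, List.filter_cons_of_pos ha]
        have h5 : 5 - rows.length = (5 - (rows.length + 1)) + 1 := by omega
        rw [h5, List.take_succ_cons]
        simp
      · have h5 : rows.length = 5 := by omega
        have hstep : pvStep rows (pvCsplit '|' t) = rows := by
          simp [pvStep, hlt]
        rw [hstep, ih _ hlen]
        simp [h5]
    · have hstep : pvStep rows (pvCsplit '|' t) = rows := by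
        simp only [pvStep, pvTokRow] at *
        rw [if_neg (by simp [ha])]
      rw [hstep, ih _ hlen]
      rw [List.map_cons, List.filter_cons_of_neg (by simpa using ha)]

-- ===== VERDICT (by name: the statement is the Claim_ definition above) =====
theorem parse_compact_activity_spec : Claim_equal_parse_compact_activity := by
  intro value _
  unfold Spec_parse_compact_activity parse_compact_activity parse_compact_activity_alt
  by_cases h : PySem.Str.strip value = "" ∨ PySem.Str.strip value = "-"
  · simp [h]
  · simp only [h, if_false]
    rw [pvRowsA_eq, List.nil_append]
    have hfa : (fun (row : List (String × String)) => row.any (fun kv => kv.2 != "")) = pvAnyP := rfl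
    rw [hfa, pvA_kept, pvScan_top, pvProc_eq _ [] (by simp)]
    simp
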